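-- pv_equiv track=rewrite | github.com/Gekkenman/AdventOfCode | 2024/day5/part2.py | isUpdateCorrect
-- ===== SOURCE A (Python) =====
-- def isUpdateCorrect(update, rules):
--         safe = True
--         for i, num in enumerate(update):
--             left = update[:i]
--             right = update[i:]
--             if left and num in rules.keys():
--                 for n in left:
--                     if n in rules[num]:
--                         safe = False
--             if right:
--                 for n in right:
--                     if n in rules.keys() and num in rules[n]:
--                         safe = False
--         return safe
-- ===== SOURCE B (Python) =====
-- def isUpdateCorrect(update, rules):
--     seen = set()
--     for num in update:
--         seen.add(num)
--         req = rules.get(num)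
--         if req is not None and any(x in seen for x in req):
--             return False
--     return True
-- ===== Notes on version B (the rewrite author's own statement) =====
-- stated objective: faster
-- what changed: Replaced the quadratic left/right-slice double scan per element by a single forward pass that keeps a running 'seen' set and tests each element's rule list against it, with an early return on the first violation.
import Mathlib
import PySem

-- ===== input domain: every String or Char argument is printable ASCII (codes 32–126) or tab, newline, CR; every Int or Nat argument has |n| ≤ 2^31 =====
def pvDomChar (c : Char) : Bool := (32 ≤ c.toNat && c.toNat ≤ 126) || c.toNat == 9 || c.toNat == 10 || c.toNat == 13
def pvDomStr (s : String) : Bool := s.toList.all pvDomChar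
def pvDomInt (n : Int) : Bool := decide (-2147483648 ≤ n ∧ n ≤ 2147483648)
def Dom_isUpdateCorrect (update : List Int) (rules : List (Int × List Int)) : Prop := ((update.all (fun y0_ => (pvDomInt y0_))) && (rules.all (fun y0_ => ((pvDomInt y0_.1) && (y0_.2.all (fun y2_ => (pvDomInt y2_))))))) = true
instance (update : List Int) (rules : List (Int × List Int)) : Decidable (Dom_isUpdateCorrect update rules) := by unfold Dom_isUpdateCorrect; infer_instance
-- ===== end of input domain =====

-- B replaces A's per-element left/right slice scans by one forward pass with a running 'seen'
-- set tested against each element's rule list, returning early on the first violation.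

-- ===== PORT A =====
def isUpdateCorrect (update : List Int) (rules : List (Int × List Int)) : Bool :=
  let d := PySem.Dict.mk rules
  (PySem.List.enumerate update).foldl
    (fun safe p =>
      let left := PySem.List.slice update none (some p.1)
      let right := PySem.List.slice update (some p.1) none
      let safe :=
        if !left.isEmpty && d.contains p.2 then
          -- 'rules[num]' is guaranteed present by the guard, so getD _ [] is exact here
          left.foldl (fun s n => if (d.getD p.2 []).contains n then false else s) safe
        else safe
      if !right.isEmpty then
        right.foldl (fun s n => if d.contains n && (d.getD n []).contains p.2 then false else s) safe
      else safe)
    true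

-- ===== PORT B =====
def pvGoB (d : PySem.Dict Int (List Int)) : List Int → PySem.Set Int → Bool
  | [], _ => true
  | num :: rest, seen =>
    let seen' := PySem.Set.add seen num
    match d.get? num with
    | none => pvGoB d rest seen'
    | some req =>
      if req.any (fun x => PySem.Set.contains seen' x) then false
      else pvGoB d rest seen'

def isUpdateCorrect_alt (update : List Int) (rules : List (Int × List Int)) : Bool :=
  pvGoB (PySem.Dict.mk rules) update PySem.Set.empty

-- ===== PRECONDITION & SPEC =====
def Spec_isUpdateCorrect (update : List Int) (rules : List (Int × List Int)) (out : Bool) : Prop := out = isUpdateCorrect_alt update rules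
instance (update : List Int) (rules : List (Int × List Int)) (out : Bool) : Decidable (Spec_isUpdateCorrect update rules out) := by unfold Spec_isUpdateCorrect; infer_instance

-- ===== CLAIM (what is proved, stated in full; the proofs are below) =====
def Claim_equal_isUpdateCorrect : Prop := ∀ (update : List Int) (rules : List (Int × List Int)), Dom_isUpdateCorrect update rules → Spec_isUpdateCorrect update rules (isUpdateCorrect update rules)

-- ===== LEMMAS AND PROOFS =====

-- Both programs return false exactly when some element's rule list contains an element at the
-- same or an earlier position.
def pvBad (update : List Int) (d : PySem.Dict Int (List Int)) : Prop :=
  ∃ (j : Nat) (h : j < update.length), ∃ x ∈ update.take (j + 1),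
    ((d.getD update[j] []).contains x) = true

lemma pv_contains_of_hit (d : PySem.Dict Int (List Int)) (num x : Int)
    (h : (d.getD num []).contains x = true) : d.contains num = true := by
  by_contra hc
  have hb : d.contains num = false := by revert hc; cases d.contains num <;> simp
  rw [PySem.Dict.getD_of_not_contains d [] hb] at h
  simp at h

-- the per-index condition A's loop body tests
def pvCond (update : List Int) (d : PySem.Dict Int (List Int)) (p : Int × Int) : Bool :=
  (PySem.List.slice update none (some p.1)).any (fun n => (d.getD p.2 []).contains n) ||
  (PySem.List.slice update (some p.1) none).any (fun n => d.contains n && (d.getD n []).contains p.2)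

lemma pv_foldl_and_not {α : Type} (c : α → Bool) (f : Bool → α → Bool)
    (hf : ∀ s x, f s x = (s && !(c x))) :
    ∀ (l : List α) (b : Bool), l.foldl f b = (b && !(l.any c)) := by
  intro l
  induction l with
  | nil => intro b; simp
  | cons a t ih =>
    intro b
    rw [List.foldl_cons, hf, ih, List.any_cons]
    cases hca : c a <;> cases hta : t.any c <;> cases b <;> simp

lemma pv_A_eq (update : List Int) (rules : List (Int × List Int)) :
    isUpdateCorrect update rules
      = !((PySem.List.enumerate update).any (pvCond update (PySem.Dict.mk rules))) := by
  unfold isUpdateCorrect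
  rw [pv_foldl_and_not (pvCond update (PySem.Dict.mk rules))]
  · simp
  · intro safe p
    set d := PySem.Dict.mk rules with hd
    set L := PySem.List.slice update none (some p.1) with hL
    set R := PySem.List.slice update (some p.1) none with hR
    have hleft : (if !L.isEmpty && d.contains p.2 then
        L.foldl (fun s n => if (d.getD p.2 []).contains n then false else s) safe
      else safe) = (safe && !(L.any (fun n => (d.getD p.2 []).contains n))) := by
      by_cases hg : (!L.isEmpty && d.contains p.2) = true
      · rw [if_pos hg, PySem.List.foldl_if_false_eq]
      · rw [if_neg hg]
        have hgf : (!L.isEmpty && d.contains p.2) = false := Bool.eq_false_iff.mpr hg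
        rcases Bool.and_eq_false_iff.1 hgf with hE | hc
        · have hnil : L = [] := by
            simp at hE
            exact hE
          simp [hnil]
        · rw [PySem.Dict.getD_of_not_contains d [] hc]
          simp
    have hright : (if !R.isEmpty then
        R.foldl (fun s n => if d.contains n && (d.getD n []).contains p.2 then false else s)
          (safe && !(L.any (fun n => (d.getD p.2 []).contains n)))
      else (safe && !(L.any (fun n => (d.getD p.2 []).contains n))))
        = ((safe && !(L.any (fun n => (d.getD p.2 []).contains n)))
            && !(R.any (fun n => d.contains n && (d.getD n []).contains p.2))) := by
      by_cases hg : (!R.isEmpty) = true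
      · rw [if_pos hg, PySem.List.foldl_if_false_eq]
      · rw [if_neg hg]
        have hnil : R = [] := by
          have := Bool.eq_false_iff.mpr hg
          simp at this
          exact this
        simp [hnil]
    show (let left := L
          let right := R
          let safe :=
            if !left.isEmpty && d.contains p.2 then
              left.foldl (fun s n => if (d.getD p.2 []).contains n then false else s) safe
            else safe
          if !right.isEmpty then
            right.foldl (fun s n => if d.contains n && (d.getD n []).contains p.2 then false else s) safe
          else safe) = (safe && !(pvCond update d p))
    simp only []
    rw [hleft, hright, pvCond, ← hL, ← hR]
    cases safe <;>
      cases hA : L.any (fun n => (d.getD p.2 []).contains n) <;>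
      cases hB : R.any (fun n => d.contains n && (d.getD n []).contains p.2) <;>
      simp

lemma pv_A_false_iff (update : List Int) (rules : List (Int × List Int)) :
    isUpdateCorrect update rules = false ↔ pvBad update (PySem.Dict.mk rules) := by
  rw [pv_A_eq]
  set d := PySem.Dict.mk rules with hd
  simp only [Bool.not_eq_false', List.any_eq_true]
  constructor
  · rintro ⟨p, hp, hc⟩
    rw [PySem.List.mem_enumerate_iff] at hp
    obtain ⟨k, hk, rfl⟩ := hp
    simp only [pvCond] at hc
    have hk' : ((0 : Int) + (k : Int)) = ((k : Int)) := by ring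
    rw [hk'] at hc
    rw [PySem.List.slice_to_natCast, PySem.List.slice_from_natCast] at hc
    rcases (by simpa [List.any_eq_true] using hc :
        (∃ n ∈ update.take k, (d.getD update[k] []).contains n = true) ∨
        (∃ n ∈ update.drop k, (d.contains n && (d.getD n []).contains update[k]) = true))
        with ⟨x, hx, hhit⟩ | ⟨m, hm, hhit⟩
    · exact ⟨k, hk, x, by
        rw [List.take_add_one]
        exact List.mem_append_left _ hx, hhit⟩
    · obtain ⟨i, hi, rfl⟩ := List.mem_iff_getElem.1 hm
      have hlen : k + i < update.length := by
        have := hi; simp [List.length_drop] at this; omega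
      refine ⟨k + i, hlen, update[k], ?_, ?_⟩
      · have hkj : k < k + i + 1 := by omega
        have : (update.take (k + i + 1))[k]'(by simp; omega) = update[k] := by
          simp [List.getElem_take]
        exact this ▸ List.getElem_mem _
      · have : (update.drop k)[i] = update[k + i] := by
          simp [List.getElem_drop]
        rw [this] at hhit
        rw [Bool.and_eq_true] at hhit
        exact hhit.2
  · rintro ⟨j, hj, x, hx, hhit⟩
    rw [List.take_add_one] at hx
    rcases List.mem_append.1 hx with hx | hx
    · refine ⟨((0 : Int) + (j : Int), update[j]), ?_, ?_⟩
      · rw [PySem.List.mem_enumerate_iff]; exact ⟨j, hj, rfl⟩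
      · simp only [pvCond]
        have hk' : ((0 : Int) + (j : Int)) = ((j : Int)) := by ring
        rw [hk', PySem.List.slice_to_natCast, Bool.or_eq_true]
        exact Or.inl (List.any_eq_true.2 ⟨x, hx, hhit⟩)
    · have hxj : x = update[j] := by
        have : update[j]? = some update[j] := List.getElem?_eq_getElem hj
        simpa [this] using hx
      subst hxj
      refine ⟨((0 : Int) + (j : Int), update[j]), ?_, ?_⟩
      · rw [PySem.List.mem_enumerate_iff]; exact ⟨j, hj, rfl⟩
      · simp only [pvCond]
        have hk' : ((0 : Int) + (j : Int)) = ((j : Int)) := by ring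
        rw [hk', PySem.List.slice_from_natCast, Bool.or_eq_true]
        refine Or.inr (List.any_eq_true.2 ⟨update[j], ?_, ?_⟩)
        · have h0 : (update.drop j)[0]'(by simp [List.length_drop]; omega) = update[j] := by
            simp [List.getElem_drop]
          exact h0 ▸ List.getElem_mem _
        · rw [Bool.and_eq_true]
          exact ⟨pv_contains_of_hit d update[j] update[j] hhit, hhit⟩

lemma pv_go_false_iff (d : PySem.Dict Int (List Int)) :
    ∀ (l : List Int) (seen : PySem.Set Int),
      pvGoB d l seen = false ↔
        ∃ (j : Nat) (h : j < l.length), ∃ x, (x ∈ seen ∨ x ∈ l.take (j + 1)) ∧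
          (d.getD l[j] []).contains x = true := by
  intro l
  induction l with
  | nil => intro seen; simp [pvGoB]
  | cons a rest ih =>
    intro seen
    have hmem : ∀ x : Int, x ∈ PySem.Set.add seen a ↔ x = a ∨ x ∈ seen := by
      intro x; exact (PySem.Set.mem_add seen a x).trans or_comm
    constructor
    · intro h
      simp only [pvGoB] at h
      cases hg : d.get? a with
      | none =>
        rw [hg] at h
        dsimp only at h
        obtain ⟨j, hj, x, hx, hhit⟩ := (ih _).1 h
        refine ⟨j + 1, by simpa using Nat.succ_lt_succ hj, x, ?_, by simpa using hhit⟩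
        rcases hx with hx | hx
        · rcases (hmem x).1 hx with rfl | hx
          · exact Or.inr (by simp [List.take_succ_cons])
          · exact Or.inl hx
        · exact Or.inr (by simp [List.take_succ_cons, hx])
      | some req =>
        rw [hg] at h
        dsimp only at h
        by_cases hany : req.any (fun x => PySem.Set.contains (PySem.Set.add seen a) x) = true
        · obtain ⟨x, hxr, hxs⟩ := List.any_eq_true.1 hany
          have hxs' : x ∈ PySem.Set.add seen a := (PySem.Set.contains_iff _ _).1 hxs
          refine ⟨0, by simp, x, ?_, ?_⟩
          · rcases (hmem x).1 hxs' with rfl | hx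
            · exact Or.inr (by simp)
            · exact Or.inl hx
          · have : d.getD a [] = req := PySem.Dict.getD_of_get?_eq_some d [] hg
            simp [this, hxr]
        · rw [if_neg hany] at h
          obtain ⟨j, hj, x, hx, hhit⟩ := (ih _).1 h
          refine ⟨j + 1, by simpa using Nat.succ_lt_succ hj, x, ?_, by simpa using hhit⟩
          rcases hx with hx | hx
          · rcases (hmem x).1 hx with rfl | hx
            · exact Or.inr (by simp [List.take_succ_cons])
            · exact Or.inl hx
          · exact Or.inr (by simp [List.take_succ_cons, hx])
    · rintro ⟨j, hj, x, hx, hhit⟩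
      simp only [pvGoB]
      cases j with
      | zero =>
        have hx' : x ∈ PySem.Set.add seen a := by
          rcases hx with hx | hx
          · exact (hmem x).2 (Or.inr hx)
          · exact (hmem x).2 (Or.inl (by simpa using hx))
        have hga : (d.getD a []).contains x = true := by simpa using hhit
        cases hg : d.get? a with
        | none =>
          exfalso
          have : d.getD a [] = [] := PySem.Dict.getD_of_get?_eq_none d [] hg
          rw [this] at hga; simp at hga
        | some req =>
          have hreq : d.getD a [] = req := PySem.Dict.getD_of_get?_eq_some d [] hg
          dsimp only
          rw [if_pos]
          exact List.any_eq_true.2 ⟨x, by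
            rw [hreq] at hga
            exact List.contains_iff_mem.mp hga,
            (PySem.Set.contains_iff _ _).2 hx'⟩
      | succ m =>
        have hrec : pvGoB d rest (PySem.Set.add seen a) = false := by
          refine (ih _).2 ⟨m, by simpa using hj, x, ?_, by simpa using hhit⟩
          rcases hx with hx | hx
          · exact Or.inl ((hmem x).2 (Or.inr hx))
          · rw [List.take_succ_cons] at hx
            rcases List.mem_cons.1 hx with rfl | hx
            · exact Or.inl ((hmem x).2 (Or.inl rfl))
            · exact Or.inr hx
        cases hg : d.get? a with
        | none => exact hrec
        | some req =>
          dsimp only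
          by_cases hany : req.any (fun x => PySem.Set.contains (PySem.Set.add seen a) x) = true
          · rw [if_pos hany]
          · rw [if_neg hany]; exact hrec

lemma pv_B_false_iff (update : List Int) (rules : List (Int × List Int)) :
    isUpdateCorrect_alt update rules = false ↔ pvBad update (PySem.Dict.mk rules) := by
  unfold isUpdateCorrect_alt pvBad
  rw [pv_go_false_iff]
  constructor
  · rintro ⟨j, hj, x, hx, hhit⟩
    rcases hx with hx | hx
    · simp [PySem.Set.empty] at hx
    · exact ⟨j, hj, x, hx, hhit⟩
  · rintro ⟨j, hj, x, hx, hhit⟩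
    exact ⟨j, hj, x, Or.inr hx, hhit⟩

-- ===== VERDICT (by name: the statement is the Claim_ definition above) =====
theorem isUpdateCorrect_spec : Claim_equal_isUpdateCorrect := by
  intro update rules _
  unfold Spec_isUpdateCorrect
  have h := (pv_A_false_iff update rules).trans (pv_B_false_iff update rules).symm
  cases hA : isUpdateCorrect update rules <;> cases hB : isUpdateCorrect_alt update rules
  · rfl
  · exact absurd (h.1 hA) (by simp [hB])
  · exact absurd (h.2 hB) (by simp [hA])
  · rfl
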